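-- pv_equiv track=rewrite | github.com/jcausse/clases_uca_ig | unidad_5/ej4.py | primera_palabra
-- ===== SOURCE A (Python) =====
-- def es_letra(c):
--     """
--     Dado un caracter, devuelve True si es una leta (a-z o A-Z) o False en caso contrario
--     """
--     ret = False             # Asumo que no es letra
--     if 'a' <= c <= 'z':     # Es minuscula?
--         ret = True              # Entonces es letra
--     elif 'A' <= c <= 'Z':    # Es mayuscula?
--         ret = True              # Entonces es letra
--     return ret              # Si fue minuscula o mayuscula, ret se puso en True. Sino, se mantuvo en False.
--
-- def primera_palabra(texto):
--     """
--     DIAGRAMA DE FLUJO DE ESTA FUNCION: https://github.com/jcausse/clases_uca_ig/blob/main/unidad_5/ej4_primera_palabra.png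
--
--     Dado un texto, obtiene la primera PALABRA del mismo.
--     """
--     indice_inicio = 0               # Aca voy a guardar el primer caracter que ES una letra
--     indice_fin = 0                  # Aca voy a guardar el ultimo caracter que ES una letra al encontrar uno que no es letra
--     i = 0
--
--     encontrado = False
--     while not encontrado and i < len(texto):        # Para cada caracter, y hasta que encuentre una letra, avanzo en el string
--         if es_letra(texto[i]):                      # Encuentro una leta ---> No avanzo y salgo del while
--             encontrado = True
--         else:                                       # No encuentro letra ---> Avanzo y no salgo del while
--             i += 1
--
--     indice_inicio = i                               # El indice de inicio es el de la primera letra que encontre, y no lo vuelvo a tocar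
--     indice_fin = i                                  # El indice de fin, por ahora, es el de la primera letra (podria ser una palabra de 1 letra)
--     i += 1
--
--     encontrado = False
--     while not encontrado and i < len(texto):        # Para cada caracter, y hasta que encuentre algo que NO sea letra, avanzo en el string
--         if es_letra(texto[i]):                      # Encuentro una letra ---> Ahora es la ultima letra encontrada (la palabra, por ahora,
--             indice_fin = i                          # termina aca)
--             i += 1
--         else:                                       # Encuentro algo que no es letra ---> El caracter anterior es la ultima letra cde la primera
--             encontrado = True                       # palabra
--
--     return texto[indice_inicio : indice_fin + 1]    # Recorto y retorno
-- ===== SOURCE B (Python) =====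
-- def es_letra(c):
--     """
--     Dado un caracter, devuelve True si es una leta (a-z o A-Z) o False en caso contrario
--     """
--     ret = False             # Asumo que no es letra
--     if 'a' <= c <= 'z':     # Es minuscula?
--         ret = True              # Entonces es letra
--     elif 'A' <= c <= 'Z':    # Es mayuscula?
--         ret = True              # Entonces es letra
--     return ret
--
--
-- def primera_palabra(texto):
--     """
--     Dado un texto, obtiene la primera PALABRA del mismo.
--     Single pass: accumulate the letters of the first run of letters, stop at
--     the first non-letter once the run has started.
--     """
--     resultado = []
--     for c in texto:
--         if es_letra(c):
--             resultado.append(c)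
--         elif resultado:
--             break
--     return ''.join(resultado)
-- ===== Notes on version B (the rewrite author's own statement) =====
-- stated objective: simpler
-- what changed: Replaced A's two index-tracking while loops plus a final slice by a single pass that accumulates the letters of the first run and breaks at the first non-letter after the run has started.
import Mathlib
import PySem

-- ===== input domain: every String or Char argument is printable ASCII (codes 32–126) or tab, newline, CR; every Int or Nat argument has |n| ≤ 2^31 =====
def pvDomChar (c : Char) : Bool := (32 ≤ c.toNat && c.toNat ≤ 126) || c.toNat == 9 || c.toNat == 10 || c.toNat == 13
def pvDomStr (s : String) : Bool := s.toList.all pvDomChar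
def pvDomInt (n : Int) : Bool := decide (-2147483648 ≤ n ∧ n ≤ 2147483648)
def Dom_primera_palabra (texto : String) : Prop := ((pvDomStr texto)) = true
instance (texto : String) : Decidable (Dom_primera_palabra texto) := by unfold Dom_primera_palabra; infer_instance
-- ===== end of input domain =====

-- B replaces A's two index-tracking while loops + slice by a single pass that
-- accumulates the letters of the first word and breaks at the first non-letter
-- after the word has started (objective: simpler).

-- ===== PORT A =====

-- es_letra: ret = False; if 'a'<=c<='z' / elif 'A'<=c<='Z' set True
def esLetra (c : Char) : Bool :=
  let ret := false
  let ret := if 'a' ≤ c ∧ c ≤ 'z' then true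
             else if 'A' ≤ c ∧ c ≤ 'Z' then true
             else ret
  ret

-- first while loop: advance i over the remaining characters until a letter is found
def pvBuscaInicio : List Char → Nat → Nat
  | [], i => i
  | c :: rest, i => if esLetra c then i else pvBuscaInicio rest (i + 1)

-- second while loop: advance i while letters are found, recording the last letter index in fin
def pvBuscaFin : List Char → Nat → Nat → Nat
  | [], _i, fin => fin
  | c :: rest, i, fin => if esLetra c then pvBuscaFin rest (i + 1) i else fin

def primera_palabra (texto : String) : String :=
  let l := texto.toList
  let inicio := pvBuscaInicio l 0
  let fin := pvBuscaFin (l.drop (inicio + 1)) (inicio + 1) inicio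
  -- texto[indice_inicio : indice_fin + 1]
  String.ofList (PySem.List.slice l (some (inicio : Int)) (some ((fin : Int) + 1)))

-- ===== PORT B =====

-- the for loop: append letters; break at the first non-letter once resultado is non-empty
def pvAcumula : List Char → List Char → List Char
  | [], resultado => resultado
  | c :: rest, resultado =>
    if esLetra c then pvAcumula rest (resultado ++ [c])
    else if resultado ≠ [] then resultado
    else pvAcumula rest resultado

def primera_palabra_alt (texto : String) : String :=
  String.ofList (pvAcumula texto.toList [])

-- ===== PRECONDITION & SPEC =====
def Spec_primera_palabra (texto : String) (out : String) : Prop := out = primera_palabra_alt texto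
instance (texto : String) (out : String) : Decidable (Spec_primera_palabra texto out) := by unfold Spec_primera_palabra; infer_instance

-- ===== CLAIM (what is proved, stated in full; the proofs are below) =====
def Claim_equal_primera_palabra : Prop := ∀ (texto : String), Dom_primera_palabra texto → Spec_primera_palabra texto (primera_palabra texto)

-- ===== LEMMAS AND PROOFS =====

-- both programs compute the first maximal run of letters: letters of the head of
-- the text after dropping the non-letter prefix
def pvSpecList (l : List Char) : List Char :=
  (l.dropWhile (fun c => !esLetra c)).takeWhile esLetra

-- B with a non-empty accumulator appends exactly the leading letters
theorem pvAcumula_ne_nil (l : List Char) : ∀ (acc : List Char), acc ≠ [] →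
    pvAcumula l acc = acc ++ l.takeWhile esLetra := by
  induction l with
  | nil => intro acc _; simp [pvAcumula]
  | cons c rest ih =>
    intro acc hacc
    by_cases hc : esLetra c
    · simp only [pvAcumula, hc, if_pos, List.takeWhile_cons]
      rw [ih (acc ++ [c]) (by simp)]
      simp
    · simp [pvAcumula, hc, hacc]

theorem pvAcumula_nil (l : List Char) : pvAcumula l [] = pvSpecList l := by
  induction l with
  | nil => simp [pvAcumula, pvSpecList]
  | cons c rest ih =>
    by_cases hc : esLetra c
    · simp only [pvAcumula, hc, if_pos, List.nil_append]
      rw [pvAcumula_ne_nil rest [c] (by simp)]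
      simp [pvSpecList, hc]
    · simpa [pvAcumula, hc, pvSpecList, List.dropWhile_cons] using ih

-- A's first loop: start index + length of the non-letter prefix
theorem pvBuscaInicio_eq (l : List Char) : ∀ (i : Nat),
    pvBuscaInicio l i = i + (l.takeWhile (fun c => !esLetra c)).length := by
  induction l with
  | nil => intro i; simp [pvBuscaInicio]
  | cons c rest ih =>
    intro i
    by_cases hc : esLetra c
    · simp [pvBuscaInicio, hc]
    · simp only [pvBuscaInicio, hc, Bool.not_eq_true', List.takeWhile_cons]
      rw [ih (i + 1)]
      simp
      omega

-- A's second loop starting just past index i with fin = i: i + length of the letter run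
theorem pvBuscaFin_eq (l : List Char) : ∀ (i : Nat),
    pvBuscaFin l (i + 1) i = i + (l.takeWhile esLetra).length := by
  induction l with
  | nil => intro i; simp [pvBuscaFin]
  | cons c rest ih =>
    intro i
    by_cases hc : esLetra c
    · simp only [pvBuscaFin, hc, if_pos, List.takeWhile_cons]
      rw [ih (i + 1)]
      simp
      omega
    · simp [pvBuscaFin, hc]

theorem pvDrop_takeWhile_length (p : Char → Bool) (l : List Char) :
    l.drop (l.takeWhile p).length = l.dropWhile p := by
  have h := List.takeWhile_append_dropWhile (p := p) (l := l)
  calc l.drop (l.takeWhile p).length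
      = (l.takeWhile p ++ l.dropWhile p).drop (l.takeWhile p).length := by rw [h]
    _ = l.dropWhile p := List.drop_left

theorem pvTake_takeWhile_length (p : Char → Bool) (l : List Char) :
    l.take (l.takeWhile p).length = l.takeWhile p :=
  (List.prefix_iff_eq_take.mp (List.takeWhile_prefix p)).symm

-- A's slice equals the same first maximal letter run
theorem pvA_eq_spec (l : List Char) :
    PySem.List.slice l (some ((pvBuscaInicio l 0 : Nat) : Int))
      (some (((pvBuscaFin (l.drop (pvBuscaInicio l 0 + 1)) (pvBuscaInicio l 0 + 1)
        (pvBuscaInicio l 0) : Nat) : Int) + 1)) = pvSpecList l := by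
  rw [pvBuscaInicio_eq l 0]
  simp only [Nat.zero_add]
  set np := (l.takeWhile (fun c => !esLetra c)).length with hnp
  have hdrop : l.drop np = l.dropWhile (fun c => !esLetra c) := by
    rw [hnp]; exact pvDrop_takeWhile_length _ l
  rcases hd : l.dropWhile (fun c => !esLetra c) with _ | ⟨c, t⟩
  · -- no letter anywhere: the whole text is the non-letter prefix, the slice is empty
    have hlen : np = l.length := by
      have h := List.takeWhile_append_dropWhile (p := fun c => !esLetra c) (l := l)
      rw [hd, List.append_nil] at h
      rw [hnp, h]
    have hdrop1 : l.drop (np + 1) = [] := List.drop_eq_nil_of_le (by omega)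
    rw [hdrop1]
    simp only [pvBuscaFin]
    have hcast : ((np : Nat) : Int) + 1 = ((np + 1 : Nat) : Int) := by push_cast; ring
    rw [hcast, PySem.List.slice_natCast, hdrop, hd]
    simp [pvSpecList, hd]
  · -- the first letter is c, at index np
    have hc : esLetra c = true := by
      have h := List.head_dropWhile_not (fun c => !esLetra c) (l := l) (by rw [hd]; simp)
      simp only [hd, List.head_cons] at h
      simpa using h
    have hdrop1 : l.drop (np + 1) = t := by
      have h : l.drop np = c :: t := by rw [hdrop, hd]
      rw [← List.drop_drop, h]; rfl
    rw [hdrop1, pvBuscaFin_eq t np]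
    set k := (t.takeWhile esLetra).length with hk
    have hcast : ((np + k : Nat) : Int) + 1 = ((np + k + 1 : Nat) : Int) := by push_cast; ring
    rw [hcast, PySem.List.slice_natCast]
    have h1 : np + k + 1 - np = k + 1 := by omega
    rw [h1, hdrop, hd]
    simp only [pvSpecList, hd, List.takeWhile_cons, hc, if_true, List.take_succ_cons]
    rw [hk, pvTake_takeWhile_length]

-- ===== VERDICT (by name: the statement is the Claim_ definition above) =====
theorem primera_palabra_spec : Claim_equal_primera_palabra := by
  intro texto _
  show String.ofList (PySem.List.slice texto.toList
      (some ((pvBuscaInicio texto.toList 0 : Nat) : Int))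
      (some (((pvBuscaFin (texto.toList.drop (pvBuscaInicio texto.toList 0 + 1))
        (pvBuscaInicio texto.toList 0 + 1) (pvBuscaInicio texto.toList 0) : Nat) : Int) + 1)))
    = String.ofList (pvAcumula texto.toList [])
  rw [pvAcumula_nil, pvA_eq_spec texto.toList]
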